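-- pv_equiv track=rewrite | github.com/wooktori/algorithm | 프로그래머스/python/LV1/공원.py | solution
-- ===== SOURCE A (Python) =====
-- def check(m, park, i, j):
--     for a in range(i, i + m):
--         for b in range(j, j + m):
--             if a < len(park) and b < len(park[0]):
--                 if park[a][b] != "-1":
--                     return False
--             else:
--                 return False
--     return True
--
-- def solution(mats, park):
--     answer = 0
--     mats.sort(reverse=True)
--     for m in mats:
--         for i in range(len(park)):
--             for j in range(len(park[0])):
--                 if check(m, park, i, j):
--                     return m
--     return -1
-- ===== SOURCE B (Python) =====
-- def solution(mats, park):
--     # One sweep computes M, the side of the largest all-free square in the park,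
--     # (grown incrementally, so M only ever increases); the answer is then the
--     # largest mat size not exceeding M.  Unlike A, mats is not sorted (or mutated).
--     R = len(park)
--     C = len(park[0])
--     if C == 0:
--         return -1
--
--     def empty(i, j, m):
--         # the m x m square with top-left corner (i, j); caller keeps it in range
--         return all(park[a][b] == "-1" for a in range(i, i + m) for b in range(j, j + m))
--
--     M = 0
--     for i in range(R):
--         for j in range(C):
--             while i + M < R and j + M < C and empty(i, j, M + 1):
--                 M += 1
--     return max((m for m in mats if m <= M), default=-1)
-- ===== Notes on version B (the rewrite author's own statement) =====
-- stated objective: alternative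
-- what changed: Instead of sorting the mats and re-scanning the whole park with a brute m*m check for each mat, B makes a single sweep over the park that incrementally grows the side M of the largest all-free square (M never shrinks), and then answers with the largest mat size not exceeding M in one pass over mats, without sorting or mutating it.
-- outside the precondition, e.g. on solution([], []): A returns -1, B raises IndexError; on solution([-1], [['x', 'x'], ['x']]): A returns -1, B raises IndexError
import Mathlib
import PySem

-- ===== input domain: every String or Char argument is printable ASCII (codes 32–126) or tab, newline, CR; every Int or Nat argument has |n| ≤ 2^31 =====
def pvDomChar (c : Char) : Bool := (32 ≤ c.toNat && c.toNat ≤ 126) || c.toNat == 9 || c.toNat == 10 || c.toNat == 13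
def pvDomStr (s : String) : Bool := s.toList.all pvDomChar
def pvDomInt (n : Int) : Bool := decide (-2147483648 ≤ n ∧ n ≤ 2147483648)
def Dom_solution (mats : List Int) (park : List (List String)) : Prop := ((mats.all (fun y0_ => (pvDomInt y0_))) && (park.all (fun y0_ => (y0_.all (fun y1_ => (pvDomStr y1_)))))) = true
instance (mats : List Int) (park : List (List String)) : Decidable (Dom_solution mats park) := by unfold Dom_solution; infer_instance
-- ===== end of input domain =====

-- B replaces A's per-mat full-park scans by one incremental sweep computing the largest
-- all-free square side M, then takes the largest mat size ≤ M (alternative algorithm;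
-- return-value equivalence only: A sorts `mats` in place, B does not mutate it).


-- ===== PORT A =====
-- check(m, park, i, j): nested loops with early `return False` = Bool `all` over both ranges
def checkA (m : Int) (park : List (List String)) (i j : Int) : Bool :=
  (PySem.List.pyRange i (i + m) 1).all (fun a =>
    (PySem.List.pyRange j (j + m) 1).all (fun b =>
      decide (a < (park.length : Int)) && decide (b < ((park.headD []).length : Int)) &&
        ((PySem.List.pyGet? ((PySem.List.pyGet? park a).getD []) b).getD "") == "-1"))
        -- park[a][b]: in range whenever A does not raise (Pre_); the .getD defaults are unreachable there

-- triple nested loop with early `return m` = find? over the sorted mats of an any/any scan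
def solution (mats : List Int) (park : List (List String)) : Int :=
  let ms := PySem.List.sorted mats (fun x => x) true   -- mats.sort(reverse=True)
  match ms.find? (fun m =>
      (PySem.List.pyRange 0 (park.length : Int) 1).any (fun i =>
        (PySem.List.pyRange 0 ((park.headD []).length : Int) 1).any (fun j =>
          checkA m park i j))) with
  | some m => m
  | none => -1

-- ===== PORT B =====
-- empty(i, j, m) of Source B: all cells of the m×m square at (i, j) equal "-1"
def emptyB (park : List (List String)) (i j m : Nat) : Bool :=
  (List.range' i m).all (fun a =>
    (List.range' j m).all (fun b => ((park.getD a []).getD b "") == "-1"))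

-- the `while i+M < R and j+M < C and empty(i, j, M+1): M += 1` loop of Source B;
-- fuel R suffices: the guard forces M < R, and M grows by 1 each iteration
def grow (park : List (List String)) (R C i j : Nat) : Nat → Nat → Nat
  | 0, M => M
  | fuel + 1, M =>
      if i + M < R && j + M < C && emptyB park i j (M + 1) then
        grow park R C i j fuel (M + 1)
      else M

def solution_alt (mats : List Int) (park : List (List String)) : Int :=
  let R := park.length
  let C := (park.headD []).length
  if C = 0 then -1
  else
    let M := (List.range R).foldl (fun M i =>
      (List.range C).foldl (fun M j => grow park R C i j R M) M) 0
    PySem.List.maxD (mats.filter (fun m => m ≤ (M : Int))) (fun x => x) (-1)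

-- ===== PRECONDITION & SPEC =====
-- Pre_ excludes the empty park (A raises IndexError at park[0] whenever mats ≠ []) and parks
-- with a later row shorter than the first row, on which both programs raise IndexError on the
-- cells they happen to scan (A may return first for some mats — see the cites); rows longer
-- than the first are fine and admitted.
def Pre_solution (mats : List Int) (park : List (List String)) : Prop :=
  park ≠ [] ∧ ∀ r ∈ park, (park.headD []).length ≤ r.length
instance (mats : List Int) (park : List (List String)) : Decidable (Pre_solution mats park) := by
  unfold Pre_solution; infer_instance
def pvWitness_solution : List Int × List (List String) :=
  ([2, 1], [["-1", "-1"], ["-1", "x"]])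
def Spec_solution (mats : List Int) (park : List (List String)) (out : Int) : Prop := out = solution_alt mats park
instance (mats : List Int) (park : List (List String)) (out : Int) : Decidable (Spec_solution mats park out) := by unfold Spec_solution; infer_instance

-- ===== CLAIM (what is proved, stated in full; the proofs are below) =====
def Claim_equal_solution : Prop := ∀ (mats : List Int) (park : List (List String)), Dom_solution mats park → Pre_solution mats park → Spec_solution mats park (solution mats park)

-- ===== LEMMAS AND PROOFS =====

-- abbreviations used by the proofs
def Cpk (park : List (List String)) : Nat := (park.headD []).length

def cellFree (park : List (List String)) (a b : Nat) : Bool :=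
  ((park.getD a []).getD b "") == "-1"

-- "an m×m square of free cells with top-left (i, j) lies inside the park"
def Fit (park : List (List String)) (i j m : Nat) : Prop :=
  i + m ≤ park.length ∧ j + m ≤ Cpk park ∧
    ∀ a < m, ∀ b < m, cellFree park (i + a) (j + b) = true

theorem fit_mono (park : List (List String)) (i j m k : Nat)
    (h : Fit park i j m) (hk : k ≤ m) : Fit park i j k := by
  obtain ⟨h1, h2, h3⟩ := h
  exact ⟨by omega, by omega, fun a ha b hb => h3 a (by omega) b (by omega)⟩


theorem emptyB_iff (park : List (List String)) (i j m : Nat) :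
    emptyB park i j m = true ↔ ∀ a < m, ∀ b < m, cellFree park (i + a) (j + b) = true := by
  simp only [emptyB, List.all_eq_true, List.mem_range'_1, cellFree]
  constructor
  · intro h a ha b hb
    exact h (i + a) ⟨by omega, by omega⟩ (j + b) ⟨by omega, by omega⟩
  · rintro h a ⟨ha1, ha2⟩ b ⟨hb1, hb2⟩
    have h1 : i + (a - i) = a := by omega
    have h2 : j + (b - j) = b := by omega
    have := h (a - i) (by omega) (b - j) (by omega)
    rwa [h1, h2] at this

theorem growStep_iff (park : List (List String)) (i j M : Nat) :
    (i + M < park.length && j + M < Cpk park && emptyB park i j (M + 1)) = true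
      ↔ Fit park i j (M + 1) := by
  simp only [Bool.and_eq_true, decide_eq_true_eq, Fit, emptyB_iff]
  constructor
  · rintro ⟨⟨h1, h2⟩, h3⟩; exact ⟨by omega, by omega, h3⟩
  · rintro ⟨h1, h2, h3⟩; exact ⟨⟨by omega, by omega⟩, h3⟩

theorem grow_ge (park : List (List String)) (R C i j : Nat) :
    ∀ fuel M, M ≤ grow park R C i j fuel M := by
  intro fuel
  induction fuel with
  | zero => intro M; simp [grow]
  | succ n ih =>
      intro M
      simp only [grow]
      split
      · exact le_trans (Nat.le_succ M) (ih (M + 1))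
      · exact le_refl M

theorem grow_fit (park : List (List String)) (i j : Nat) :
    ∀ fuel M, grow park park.length (Cpk park) i j fuel M = M ∨
      Fit park i j (grow park park.length (Cpk park) i j fuel M) := by
  intro fuel
  induction fuel with
  | zero => intro M; exact Or.inl rfl
  | succ n ih =>
      intro M
      simp only [grow]
      split
      · rename_i hc
        rcases ih (M + 1) with h | h
        · right; rw [h]; exact (growStep_iff park i j M).mp hc
        · right; exact h
      · exact Or.inl rfl

theorem grow_not_fit (park : List (List String)) (i j : Nat) :
    ∀ fuel M, park.length ≤ M + fuel →
      ¬ Fit park i j (grow park park.length (Cpk park) i j fuel M + 1) := by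
  intro fuel
  induction fuel with
  | zero =>
      intro M h hf
      simp only [grow] at hf
      have := hf.1
      omega
  | succ n ih =>
      intro M h
      simp only [grow]
      split
      · exact ih (M + 1) (by omega)
      · rename_i hc
        intro hf
        exact hc ((growStep_iff park i j M).mpr hf)

theorem grow_ub (park : List (List String)) (i j M k : Nat)
    (hk : Fit park i j k) :
    k ≤ grow park park.length (Cpk park) i j park.length M := by
  rcases Nat.lt_or_ge (grow park park.length (Cpk park) i j park.length M) k with h | h
  · exact absurd (fit_mono park i j k _ hk (by omega))
      (grow_not_fit park i j park.length M (by omega))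
  · exact h

theorem sweep_inner (park : List (List String)) (i : Nat) :
    ∀ (js : List Nat) (M : Nat),
      M ≤ js.foldl (fun M j => grow park park.length (Cpk park) i j park.length M) M ∧
      ((M = 0 ∨ ∃ i' j', Fit park i' j' M) →
        ((js.foldl (fun M j => grow park park.length (Cpk park) i j park.length M) M) = 0 ∨
          ∃ i' j', Fit park i' j'
            (js.foldl (fun M j => grow park park.length (Cpk park) i j park.length M) M))) ∧
      (∀ j ∈ js, ∀ k, Fit park i j k →
        k ≤ js.foldl (fun M j => grow park park.length (Cpk park) i j park.length M) M) := by
  intro js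
  induction js with
  | nil => intro M; refine ⟨le_refl M, fun h => h, by simp⟩
  | cons j t ih =>
      intro M
      simp only [List.foldl_cons]
      obtain ⟨h1, h2, h3⟩ := ih (grow park park.length (Cpk park) i j park.length M)
      refine ⟨le_trans (grow_ge park park.length (Cpk park) i j park.length M) h1, ?_, ?_⟩
      · intro hq
        apply h2
        rcases grow_fit park i j park.length M with h | h
        · rw [h]; exact hq
        · exact Or.inr ⟨i, j, h⟩
      · intro j' hj' k hk
        rcases List.mem_cons.mp hj' with rfl | hmem
        · exact le_trans (grow_ub park i j' M k hk) h1
        · exact h3 j' hmem k hk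

theorem sweep_outer (park : List (List String)) (js : List Nat) :
    ∀ (is : List Nat) (M : Nat),
      M ≤ is.foldl (fun M i => js.foldl (fun M j => grow park park.length (Cpk park) i j park.length M) M) M ∧
      ((M = 0 ∨ ∃ i' j', Fit park i' j' M) →
        ((is.foldl (fun M i => js.foldl (fun M j => grow park park.length (Cpk park) i j park.length M) M) M) = 0 ∨
          ∃ i' j', Fit park i' j'
            (is.foldl (fun M i => js.foldl (fun M j => grow park park.length (Cpk park) i j park.length M) M) M))) ∧
      (∀ i ∈ is, ∀ j ∈ js, ∀ k, Fit park i j k →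
        k ≤ is.foldl (fun M i => js.foldl (fun M j => grow park park.length (Cpk park) i j park.length M) M) M) := by
  intro is
  induction is with
  | nil => intro M; refine ⟨le_refl M, fun h => h, by simp⟩
  | cons i t ih =>
      intro M
      simp only [List.foldl_cons]
      obtain ⟨g1, g2, g3⟩ := sweep_inner park i js M
      obtain ⟨h1, h2, h3⟩ := ih (js.foldl (fun M j => grow park park.length (Cpk park) i j park.length M) M)
      refine ⟨le_trans g1 h1, fun hq => h2 (g2 hq), ?_⟩
      intro i' hi' j hj k hk
      rcases List.mem_cons.mp hi' with rfl | hmem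
      · exact le_trans (g3 j hj k hk) h1
      · exact h3 i' hmem j hj k hk

theorem checkA_nonpos (m : Int) (park : List (List String)) (i j : Int) (hm : m ≤ 0) :
    checkA m park i j = true := by
  simp [checkA, PySem.List.pyRange_one_eq_nil (by omega : i + m ≤ i)]

theorem checkA_pos (park : List (List String)) (i j n : Nat) (hn : 1 ≤ n) :
    checkA (n : Int) park (i : Int) (j : Int) = true ↔ Fit park i j n := by
  unfold checkA
  simp only [PySem.List.pyRange_one, List.all_map, List.all_eq_true, List.mem_range,
    Function.comp, add_sub_cancel_left, Int.toNat_natCast, Bool.and_eq_true, decide_eq_true_eq]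
  simp only [← Nat.cast_add, PySem.List.pyGet?_natCast, Nat.cast_lt, ← List.getD_eq_getElem?_getD]
  unfold Fit cellFree Cpk
  constructor
  · intro h
    refine ⟨?_, ?_, fun a ha b hb => (h a ha b hb).2⟩
    · have := (h (n - 1) (by omega) 0 (by omega)).1.1
      omega
    · have := (h 0 (by omega) (n - 1) (by omega)).1.2
      omega
  · rintro ⟨h1, h2, h3⟩ a ha b hb
    exact ⟨⟨by omega, by omega⟩, h3 a ha b hb⟩

theorem anyIJ_eq (park : List (List String)) (hC : 1 ≤ Cpk park) (Mfin : Nat)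
    (hub : ∀ i j k, Fit park i j k → k ≤ Mfin)
    (hfit : Mfin = 0 ∨ ∃ i j, Fit park i j Mfin) (m : Int) :
    ((PySem.List.pyRange 0 (park.length : Int) 1).any (fun i =>
      (PySem.List.pyRange 0 ((park.headD []).length : Int) 1).any (fun j =>
        checkA m park i j))) = decide (m ≤ (Mfin : Nat)) := by
  have hR : 1 ≤ park.length := by
    unfold Cpk at hC
    cases park with
    | nil => simp at hC
    | cons r t => simp
  rw [Bool.eq_iff_iff]
  simp only [List.any_eq_true, PySem.List.mem_pyRange_one, decide_eq_true_eq]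
  rcases le_or_gt m 0 with hm | hm
  · constructor
    · intro _; omega
    · intro _
      exact ⟨0, ⟨le_refl 0, by exact_mod_cast hR⟩, 0,
        ⟨le_refl 0, by unfold Cpk at hC; exact_mod_cast hC⟩, checkA_nonpos m park 0 0 hm⟩
  · have hmn : m = ((m.toNat : Nat) : Int) := by omega
    have hn1 : 1 ≤ m.toNat := by omega
    constructor
    · rintro ⟨i, ⟨hi0, hiR⟩, j, ⟨hj0, hjC⟩, hch⟩
      have hi' : i = ((i.toNat : Nat) : Int) := by omega
      have hj' : j = ((j.toNat : Nat) : Int) := by omega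
      rw [hi', hj', hmn] at hch
      have hfitm := (checkA_pos park i.toNat j.toNat m.toNat hn1).mp hch
      have := hub _ _ _ hfitm
      omega
    · intro hle
      have hM1 : 1 ≤ Mfin := by omega
      rcases hfit with h0 | ⟨i, j, hfitM⟩
      · omega
      · have hfitm : Fit park i j m.toNat := fit_mono park i j Mfin m.toNat hfitM (by omega)
        have hiR : i < park.length := by
          have := hfitm.1; omega
        have hjC : j < Cpk park := by
          have := hfitm.2.1; omega
        refine ⟨(i : Int), ⟨by omega, by exact_mod_cast hiR⟩, (j : Int),
          ⟨by omega, ?_⟩, ?_⟩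
        · unfold Cpk at hjC; exact_mod_cast hjC
        · rw [hmn]; exact (checkA_pos park i j m.toNat hn1).mpr hfitm

theorem maxD_perm (l1 l2 : List Int) (d : Int) (hp : l1.Perm l2) :
    PySem.List.maxD l1 (fun x => x) d = PySem.List.maxD l2 (fun x => x) d := by
  unfold PySem.List.maxD PySem.List.max?
  rw [@List.Perm.foldl_eq _ _ _ _ _ ⟨?_⟩ hp none]
  have hmax : ∀ (m x : Int), (if m < x then some x else some m) = some (max m x) := by
    intro m x; split_ifs <;> simp <;> omega
  rintro (_ | b) a1 a2 <;> simp only [hmax]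
  · rw [max_comm]
  · rw [max_right_comm]

theorem pairwise_find_eq_maxD (t : Int) :
    ∀ (s : List Int), s.Pairwise (fun a b => b ≤ a) →
    (match s.find? (fun m => decide (m ≤ t)) with
      | some m => m
      | none => -1)
      = PySem.List.maxD (s.filter (fun m => decide (m ≤ t))) (fun x => x) (-1) := by
  intro s
  induction s with
  | nil => intro _; rfl
  | cons h tl ih =>
      intro hp
      have hhead : ∀ b ∈ tl, b ≤ h := (List.pairwise_cons.mp hp).1
      have htl := (List.pairwise_cons.mp hp).2
      by_cases hh : h ≤ t
      · rw [List.find?_cons_of_pos (by simpa using hh), List.filter_cons_of_pos (by simpa using hh)]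
        rw [PySem.List.maxD, PySem.List.max?_id_cons]
        have hle : ∀ y ∈ tl.filter (fun m => decide (m ≤ t)), y ≤ h :=
          fun y hy => hhead y (List.mem_of_mem_filter hy)
        have h1 := (PySem.List.le_foldl_max (tl.filter (fun m => decide (m ≤ t))) h).1
        rcases PySem.List.foldl_max_mem (tl.filter (fun m => decide (m ≤ t))) h with he | he
        · rw [he]; rfl
        · have := hle _ he
          simp only [Option.getD_some]
          omega
      · rw [List.find?_cons_of_neg (by simpa using hh), List.filter_cons_of_neg (by simpa using hh)]
        exact ih htl

theorem sorted_find_eq_maxD (mats : List Int) (t : Int) :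
    (match (PySem.List.sorted mats (fun x => x) true).find? (fun m => decide (m ≤ t)) with
      | some m => m
      | none => -1)
      = PySem.List.maxD (mats.filter (fun m => decide (m ≤ t))) (fun x => x) (-1) := by
  rw [pairwise_find_eq_maxD t _ (PySem.List.sorted_pairwise_rev mats (fun x => x))]
  exact maxD_perm _ _ _ ((PySem.List.sorted_perm mats (fun x => x) true).filter _)

theorem solution_spec : Claim_equal_solution := by
  intro mats park _ hpre
  unfold Spec_solution
  simp only [solution, solution_alt]
  by_cases hC : (park.headD []).length = 0
  · rw [if_pos hC]
    have hnil : PySem.List.pyRange 0 ((park.headD []).length : Int) 1 = [] := by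
      rw [hC]; exact PySem.List.pyRange_one_eq_nil (by norm_num)
    have hfind : List.find? (fun m => (PySem.List.pyRange 0 (park.length : Int) 1).any fun i =>
        (PySem.List.pyRange 0 ((park.headD []).length : Int) 1).any fun j => checkA m park i j)
        (PySem.List.sorted mats (fun x => x) true) = none := by
      rw [List.find?_eq_none]
      intro m _
      simp only [hnil, List.any_nil]
      simp
    rw [hfind]
  · rw [if_neg hC]
    have hC1 : 1 ≤ Cpk park := by unfold Cpk; omega
    obtain ⟨_, h2, h3⟩ := sweep_outer park (List.range (Cpk park)) (List.range park.length) 0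
    have hfit0 := h2 (Or.inl rfl)
    have hub : ∀ i j k, Fit park i j k →
        k ≤ (List.range park.length).foldl (fun M i =>
          (List.range (park.headD []).length).foldl
            (fun M j => grow park park.length (park.headD []).length i j park.length M) M) 0 := by
      intro i j k hk
      rcases Nat.eq_zero_or_pos k with rfl | hk1
      · exact Nat.zero_le _
      · exact h3 i (List.mem_range.mpr (by have := hk.1; omega))
          j (List.mem_range.mpr (by have := hk.2.1; omega)) k hk
    have hfit : (List.range park.length).foldl (fun M i =>
          (List.range (park.headD []).length).foldl
            (fun M j => grow park park.length (park.headD []).length i j park.length M) M) 0 = 0 ∨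
        ∃ i' j', Fit park i' j'
          ((List.range park.length).foldl (fun M i =>
            (List.range (park.headD []).length).foldl
              (fun M j => grow park park.length (park.headD []).length i j park.length M) M) 0) :=
      hfit0
    have hpred : (fun m => (PySem.List.pyRange 0 (park.length : Int) 1).any fun i =>
        (PySem.List.pyRange 0 ((park.headD []).length : Int) 1).any fun j =>
          checkA m park i j) = (fun m => decide (m ≤
            (((List.range park.length).foldl (fun M i =>
              (List.range (park.headD []).length).foldl
                (fun M j => grow park park.length (park.headD []).length i j park.length M) M) 0 : Nat) : Int))) :=
      funext (fun m => anyIJ_eq park hC1 _ hub hfit m)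
    rw [hpred]
    exact sorted_find_eq_maxD mats _
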